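-- pv_equiv track=rewrite | github.com/w-ash/narada | narada/cli/ui.py | get_command_suggestions
-- ===== SOURCE A (Python) =====
-- def get_command_suggestions(
--     input_cmd: str, commands: list[dict[str, str]]
-- ) -> list[str]:
--     """Get command suggestions based on partial input.
--
--     Uses fuzzy matching to suggest commands that are similar to what was typed.
--
--     Args:
--         input_cmd: Partial command that was typed
--         commands: List of available commands
--
--     Returns:
--         List of suggested command names
--     """
--     if not input_cmd:
--         return []
--
--     # Simple fuzzy matching - could be enhanced with a proper fuzzy search library
--     input_lower = input_cmd.lower()
--
--     # Check for exact matches first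
--     exact_matches = [
--         cmd["name"] for cmd in commands if cmd["name"].lower() == input_lower
--     ]
--     if exact_matches:
--         return exact_matches
--
--     # Then check for commands that start with the input
--     prefix_matches = [
--         cmd["name"] for cmd in commands if cmd["name"].lower().startswith(input_lower)
--     ]
--     if prefix_matches:
--         return prefix_matches
--
--     # Then check for commands that contain the input
--     return [cmd["name"] for cmd in commands if input_lower in cmd["name"].lower()]
-- ===== SOURCE B (Python) =====
-- def get_command_suggestions(input_cmd, commands):
--     if not input_cmd:
--         return []
--     input_lower = input_cmd.lower()
--     exact, prefix, contains = [], [], []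
--     for cmd in commands:
--         name = cmd["name"]
--         name_lower = name.lower()
--         if name_lower == input_lower:
--             exact.append(name)
--         elif name_lower.startswith(input_lower):
--             prefix.append(name)
--         elif input_lower in name_lower:
--             contains.append(name)
--     return exact or prefix or contains or []
-- ===== Notes on version B (the rewrite author's own statement) =====
-- stated objective: alternative
-- what changed: Replaces A's three separate comprehension scans over commands with a single pass that buckets each name into exact/prefix/contains tiers (each name classified once into its highest tier), then returns the first non-empty tier.
import Mathlib
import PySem

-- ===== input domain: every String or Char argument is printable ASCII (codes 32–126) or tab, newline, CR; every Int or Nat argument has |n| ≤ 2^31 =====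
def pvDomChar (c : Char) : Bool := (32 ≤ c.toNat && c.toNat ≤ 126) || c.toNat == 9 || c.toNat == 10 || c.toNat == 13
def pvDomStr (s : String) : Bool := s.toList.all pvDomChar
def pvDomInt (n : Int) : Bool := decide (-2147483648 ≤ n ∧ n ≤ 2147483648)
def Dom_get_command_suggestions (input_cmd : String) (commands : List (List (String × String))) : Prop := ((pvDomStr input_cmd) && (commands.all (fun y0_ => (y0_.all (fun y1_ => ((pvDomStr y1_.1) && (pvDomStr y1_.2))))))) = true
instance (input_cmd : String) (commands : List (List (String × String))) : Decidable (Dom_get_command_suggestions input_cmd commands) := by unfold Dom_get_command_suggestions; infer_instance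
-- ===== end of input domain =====

-- B replaces A's three comprehension scans over `commands` by a single pass that buckets
-- each name into exact/prefix/contains tiers and returns the first non-empty tier (alternative decomposition).

-- ===== PORT A =====
-- cmd["name"]: first-match lookup; inputs where the key is missing raise KeyError in Python
-- and are excluded by Pre_ below (the "" default here is never relied on inside Pre_).
def pvNameOf (cmd : List (String × String)) : String := (PySem.Dict.mk cmd).getD "name" ""

def get_command_suggestions (input_cmd : String) (commands : List (List (String × String))) : List String :=
  if input_cmd = "" then []
  else
    let input_lower := PySem.Str.lower input_cmd
    let exact_matches := (commands.filter (fun cmd => PySem.Str.lower (pvNameOf cmd) == input_lower)).map pvNameOf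
    if exact_matches ≠ [] then exact_matches
    else
      let prefix_matches := (commands.filter (fun cmd => PySem.Str.startswith (PySem.Str.lower (pvNameOf cmd)) input_lower)).map pvNameOf
      if prefix_matches ≠ [] then prefix_matches
      else (commands.filter (fun cmd => PySem.Str.isIn input_lower (PySem.Str.lower (pvNameOf cmd)))).map pvNameOf

-- ===== PORT B =====
def pvClassify (input_lower : String) (acc : List String × List String × List String)
    (cmd : List (String × String)) : List String × List String × List String :=
  let name := pvNameOf cmd
  let name_lower := PySem.Str.lower name
  if name_lower == input_lower then (acc.1 ++ [name], acc.2.1, acc.2.2)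
  else if PySem.Str.startswith name_lower input_lower then (acc.1, acc.2.1 ++ [name], acc.2.2)
  else if PySem.Str.isIn input_lower name_lower then (acc.1, acc.2.1, acc.2.2 ++ [name])
  else acc

def get_command_suggestions_alt (input_cmd : String) (commands : List (List (String × String))) : List String :=
  if input_cmd = "" then []
  else
    let input_lower := PySem.Str.lower input_cmd
    let buckets := commands.foldl (pvClassify input_lower) ([], [], [])
    if buckets.1 ≠ [] then buckets.1
    else if buckets.2.1 ≠ [] then buckets.2.1
    else buckets.2.2

-- ===== PRECONDITION & SPEC =====
-- Pre_ excludes exactly the inputs on which Python A raises KeyError: a non-empty input_cmd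
-- together with some command dict lacking the "name" key.
def Pre_get_command_suggestions (input_cmd : String) (commands : List (List (String × String))) : Prop :=
  input_cmd = "" ∨ commands.all (fun cmd => (PySem.Dict.mk cmd).contains "name") = true
instance (input_cmd : String) (commands : List (List (String × String))) : Decidable (Pre_get_command_suggestions input_cmd commands) := by unfold Pre_get_command_suggestions; infer_instance

def pvWitness_get_command_suggestions : String × (List (List (String × String))) :=
  ("li", [[("name", "list")], [("name", "Like"), ("help", "h")]])

def Spec_get_command_suggestions (input_cmd : String) (commands : List (List (String × String))) (out : List String) : Prop := out = get_command_suggestions_alt input_cmd commands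
instance (input_cmd : String) (commands : List (List (String × String))) (out : List String) : Decidable (Spec_get_command_suggestions input_cmd commands out) := by unfold Spec_get_command_suggestions; infer_instance

-- ===== CLAIM (what is proved, stated in full; the proofs are below) =====
def Claim_equal_get_command_suggestions : Prop := ∀ (input_cmd : String) (commands : List (List (String × String))), Dom_get_command_suggestions input_cmd commands → Pre_get_command_suggestions input_cmd commands → Spec_get_command_suggestions input_cmd commands (get_command_suggestions input_cmd commands)

-- ===== LEMMAS AND PROOFS =====

-- The one-pass fold produces exactly the three tier lists, each bucket taking the names
-- that fall in its tier and no higher one.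
theorem pvClassify_foldl (il : String) (cmds : List (List (String × String)))
    (e p c : List String) :
    cmds.foldl (pvClassify il) (e, p, c) =
      (e ++ (cmds.filter (fun x => PySem.Str.lower (pvNameOf x) == il)).map pvNameOf,
       p ++ (cmds.filter (fun x => !(PySem.Str.lower (pvNameOf x) == il)
              && PySem.Str.startswith (PySem.Str.lower (pvNameOf x)) il)).map pvNameOf,
       c ++ (cmds.filter (fun x => !(PySem.Str.lower (pvNameOf x) == il)
              && !(PySem.Str.startswith (PySem.Str.lower (pvNameOf x)) il)
              && PySem.Str.isIn il (PySem.Str.lower (pvNameOf x)))).map pvNameOf) := by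
  induction cmds generalizing e p c with
  | nil => simp
  | cons hd tl ih =>
    simp only [List.foldl_cons, List.filter_cons]
    by_cases h1 : PySem.Str.lower (pvNameOf hd) == il
    · simp [pvClassify, h1, ih]
    · by_cases h2 : PySem.Chars.startswith (PySem.Chars.lower (pvNameOf hd).toList) il.toList
      · simp [pvClassify, h1, h2, ih]
      · by_cases h3 : PySem.Chars.isIn il.toList (PySem.Chars.lower (pvNameOf hd).toList)
        · simp [pvClassify, h1, h2, h3, ih]
        · simp [pvClassify, h1, h2, h3, ih]

theorem pv_filter_empty_forall {α : Type} (q : α → Bool) (xs : List α)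
    (h : xs.filter q = []) : ∀ x ∈ xs, q x = false := by
  intro x hx
  by_contra hq
  have : x ∈ xs.filter q := List.mem_filter.mpr ⟨hx, by simpa using hq⟩
  simp [h] at this

-- ===== VERDICT (by name: the statement is the Claim_ definition above) =====
theorem get_command_suggestions_spec : Claim_equal_get_command_suggestions := by
  intro input_cmd commands _ _
  unfold Spec_get_command_suggestions get_command_suggestions get_command_suggestions_alt
  by_cases hemp : input_cmd = ""
  · simp only [hemp, if_true]
  · simp only [hemp, if_false]
    rw [pvClassify_foldl]
    set il := PySem.Str.lower input_cmd with hil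
    simp only [List.nil_append]
    by_cases he : (commands.filter (fun x => PySem.Str.lower (pvNameOf x) == il)) = []
    · have he' := pv_filter_empty_forall _ _ he
      rw [he]
      simp only [List.map_nil, ne_eq, not_true, if_false]
      have hpfx : commands.filter (fun x => !(PySem.Str.lower (pvNameOf x) == il)
              && PySem.Str.startswith (PySem.Str.lower (pvNameOf x)) il)
          = commands.filter (fun x => PySem.Str.startswith (PySem.Str.lower (pvNameOf x)) il) := by
        apply List.filter_congr
        intro x hx
        simp only [he' x hx, Bool.not_false, Bool.true_and]
      rw [hpfx]
      by_cases hp : (commands.filter (fun x => PySem.Str.startswith (PySem.Str.lower (pvNameOf x)) il)) = []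
      · have hp' := pv_filter_empty_forall _ _ hp
        rw [hp]
        simp only [List.map_nil, not_true, if_false]
        have hcont : commands.filter (fun x => !(PySem.Str.lower (pvNameOf x) == il)
                && !(PySem.Str.startswith (PySem.Str.lower (pvNameOf x)) il)
                && PySem.Str.isIn il (PySem.Str.lower (pvNameOf x)))
            = commands.filter (fun x => PySem.Str.isIn il (PySem.Str.lower (pvNameOf x))) := by
          apply List.filter_congr
          intro x hx
          simp only [he' x hx, hp' x hx, Bool.not_false, Bool.true_and]
        rw [hcont]
      · have hpne : (commands.filter (fun x => PySem.Str.startswith (PySem.Str.lower (pvNameOf x)) il)).map pvNameOf ≠ [] := by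
          simpa using hp
        rw [if_pos hpne, if_pos hpne]
    · have hne : (commands.filter (fun x => PySem.Str.lower (pvNameOf x) == il)).map pvNameOf ≠ [] := by
        simpa using he
      rw [if_pos hne, if_pos hne]
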